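-- pv_equiv track=rewrite | github.com/gabsamorais/Projeto_S-GEMAPy | S-GEMAPy.py | retirando_espacos
-- ===== SOURCE A (Python) =====
-- from typing import List
--
-- def retirando_espacos(entrada: str) -> List[int]:
--     conjunto_termos = []
--     termo = ""
--     for caractere in entrada:
--         if caractere == " " and termo != "":
--             conjunto_termos.append(int(termo))
--             termo = ""
--         elif caractere != " ":
--             termo += caractere
--     if termo != "":
--         conjunto_termos.append(int(termo))
--     return conjunto_termos
-- ===== SOURCE B (Python) =====
-- from typing import List
--
-- def retirando_espacos(entrada: str) -> List[int]:
--     # tokenize on the explicit single-space separator, drop empty tokens, convert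
--     return [int(t) for t in entrada.split(" ") if t]
-- ===== Notes on version B (the rewrite author's own statement) =====
-- stated objective: idiomatic
-- what changed: Replaces A's char-by-char accumulator state machine with a two-phase tokenize-then-convert: split on the explicit single-space separator, filter empty tokens, map int.
import Mathlib
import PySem

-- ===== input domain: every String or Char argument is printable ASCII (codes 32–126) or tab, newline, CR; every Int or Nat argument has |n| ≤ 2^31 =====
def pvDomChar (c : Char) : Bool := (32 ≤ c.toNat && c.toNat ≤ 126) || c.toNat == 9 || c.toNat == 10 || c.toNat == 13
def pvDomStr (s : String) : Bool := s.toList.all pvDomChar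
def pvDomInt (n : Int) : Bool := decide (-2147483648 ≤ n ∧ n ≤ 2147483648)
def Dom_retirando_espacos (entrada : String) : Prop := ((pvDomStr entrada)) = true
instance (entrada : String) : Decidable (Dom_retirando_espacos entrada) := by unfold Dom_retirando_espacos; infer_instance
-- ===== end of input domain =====

-- B replaces A's char-by-char accumulator state machine with split(" ") + filter + map int (idiomatic).

-- int(termo); inside Pre_ every token parses, so getD 0 is never taken
def pvIntOf (t : List Char) : Int := (PySem.Int.ofChars? t).getD 0

-- ===== PORT A =====
def retirandoLoopA : List Char → List Int → List Char → List Int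
  | [], conjunto, termo => if termo ≠ [] then conjunto ++ [pvIntOf termo] else conjunto
  | c :: cs, conjunto, termo =>
    if c = ' ' ∧ termo ≠ [] then retirandoLoopA cs (conjunto ++ [pvIntOf termo]) []
    else if c ≠ ' ' then retirandoLoopA cs conjunto (termo ++ [c])
    else retirandoLoopA cs conjunto termo

def retirando_espacos (entrada : String) : List Int :=
  retirandoLoopA entrada.toList [] []

-- ===== PORT B =====
def retirando_espacos_alt (entrada : String) : List Int :=
  ((PySem.Chars.splitOn entrada.toList [' ']).filter (fun t => !t.isEmpty)).map pvIntOf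

-- ===== PRECONDITION & SPEC =====
-- Pre_ excludes exactly the inputs where int() raises ValueError in both programs:
-- some nonempty space-separated token is not an integer literal.
def Pre_retirando_espacos (entrada : String) : Prop :=
  ∀ t ∈ PySem.Chars.splitOn entrada.toList [' '], t ≠ [] → (PySem.Int.ofChars? t).isSome
instance (entrada : String) : Decidable (Pre_retirando_espacos entrada) := by
  unfold Pre_retirando_espacos; infer_instance
def pvWitness_retirando_espacos : String := " 1  -23 "

def Spec_retirando_espacos (entrada : String) (out : List Int) : Prop := out = retirando_espacos_alt entrada
instance (entrada : String) (out : List Int) : Decidable (Spec_retirando_espacos entrada out) := by unfold Spec_retirando_espacos; infer_instance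

-- ===== CLAIM (what is proved, stated in full; the proofs are below) =====
def Claim_equal_retirando_espacos : Prop := ∀ (entrada : String), Dom_retirando_espacos entrada → Pre_retirando_espacos entrada → Spec_retirando_espacos entrada (retirando_espacos entrada)

-- ===== LEMMAS AND PROOFS =====

-- the natural single-character splitter splitOn computes
def pvSplitSp (pre : List Char) : List Char → List (List Char)
  | [] => [pre]
  | c :: cs => if c = ' ' then pre :: pvSplitSp [] cs else pvSplitSp (pre ++ [c]) cs

theorem splitOn_go_spec : ∀ (fuel : Nat) (l cur : List Char) (acc : List (List Char)),
    l.length < fuel →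
    PySem.Chars.splitOn.go [' '] fuel l cur acc = acc.reverse ++ pvSplitSp cur.reverse l := by
  intro fuel
  induction fuel with
  | zero => intro l cur acc h; omega
  | succ f ih =>
    intro l cur acc h
    cases l with
    | nil => simp [PySem.Chars.splitOn.go, pvSplitSp]
    | cons c cs =>
      by_cases hc : c = ' '
      · subst hc
        simp only [PySem.Chars.splitOn.go, List.isPrefixOf, BEq.rfl, Bool.true_and,
          if_pos]
        rw [ih]
        · simp [pvSplitSp]
        · simpa using h
      · have hpre : [' '].isPrefixOf (c :: cs) = false := by
          simp [List.isPrefixOf]; exact fun h => hc h.symm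
        simp only [PySem.Chars.splitOn.go, hpre, Bool.false_eq_true, if_false]
        rw [ih]
        · simp [pvSplitSp, hc]
        · simpa using h

theorem splitOn_eq_pvSplitSp (cs : List Char) :
    PySem.Chars.splitOn cs [' '] = pvSplitSp [] cs := by
  unfold PySem.Chars.splitOn
  rw [splitOn_go_spec (cs.length + 1) cs [] [] (by omega)]
  simp

theorem loopA_spec : ∀ (cs termo : List Char) (conjunto : List Int),
    retirandoLoopA cs conjunto termo =
      conjunto ++ ((pvSplitSp termo cs).filter (fun t => !t.isEmpty)).map pvIntOf := by
  intro cs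
  induction cs with
  | nil =>
    intro termo conjunto
    cases termo with
    | nil => simp [retirandoLoopA, pvSplitSp]
    | cons a b => simp [retirandoLoopA, pvSplitSp]
  | cons c cs ih =>
    intro termo conjunto
    by_cases hc : c = ' '
    · subst hc
      cases termo with
      | nil => simp [retirandoLoopA, pvSplitSp, ih]
      | cons a b =>
        have hcond : (' ' = ' ' ∧ (a :: b) ≠ ([] : List Char)) := ⟨rfl, by simp⟩
        simp only [retirandoLoopA, if_pos hcond]
        rw [ih]
        simp [pvSplitSp]
    · simp only [retirandoLoopA, hc, false_and, if_false, if_pos hc]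
      rw [ih]
      simp [pvSplitSp, hc]

-- ===== VERDICT (by name: the statement is the Claim_ definition above) =====
theorem retirando_espacos_spec : Claim_equal_retirando_espacos := by
  intro entrada _ _
  unfold Spec_retirando_espacos retirando_espacos retirando_espacos_alt
  rw [splitOn_eq_pvSplitSp, loopA_spec]
  simp
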